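-- pv_equiv track=rewrite | github.com/Jang-Donghyeok/Baekjoon | 3085-사탕게임.py | check
-- ===== SOURCE A (Python) =====
-- def check(N, s_row, e_row, s_col, e_col):
--     n = len(N)
--     result = 1
--     for i in range(s_row, e_row+1):
--         cnt = 1
--         for j in range(1, n):
--             if N[i][j-1] == N[i][j]:
--                 cnt += 1
--             else:
--                 cnt = 1
--             if cnt > result:
--                 result = cnt
--     for i in range(s_col, e_col+1):
--         cnt = 1
--         for j in range(1,n):
--             if N[j-1][i] == N[j][i]:
--                 cnt += 1
--             else:
--                 cnt = 1
--             if cnt > result: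
--                 result = cnt
--     return result
-- ===== SOURCE B (Python) =====
-- # Brute-force constant-window search: instead of A's incremental counter-and-reset
-- # scan, every [s, e] window of each considered line is tested for constancy (a count
-- # test on the window slice) and the longest constant window wins.
-- def _longest_constant_window(seq):
--     n = len(seq)
--     best = 1
--     for s in range(n):
--         for e in range(s, n):
--             w = seq[s:e + 1]
--             if w.count(w[0]) == len(w):
--                 if e - s + 1 > best:
--                     best = e - s + 1
--     return best
--
-- def check(N, s_row, e_row, s_col, e_col):
--     n = len(N)
--     if n < 2:
--         return 1
--     best = 1
--     for i in range(s_row, e_row + 1):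
--         b = _longest_constant_window(N[i][:n])
--         if b > best:
--             best = b
--     for i in range(s_col, e_col + 1):
--         b = _longest_constant_window([N[j][i] for j in range(n)])
--         if b > best:
--             best = b
--     return best
-- ===== Notes on version B (the rewrite author's own statement) =====
-- stated objective: alternative
-- what changed: Replaces A's incremental counter-and-reset scan by a brute-force search over all [s,e] windows of each considered line, testing each window for constancy with a count test on the slice and keeping the longest constant window; Pre_ excludes only inputs where A raises IndexError (rows shorter than len(N) or row/column indices out of Python range).
import Mathlib
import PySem

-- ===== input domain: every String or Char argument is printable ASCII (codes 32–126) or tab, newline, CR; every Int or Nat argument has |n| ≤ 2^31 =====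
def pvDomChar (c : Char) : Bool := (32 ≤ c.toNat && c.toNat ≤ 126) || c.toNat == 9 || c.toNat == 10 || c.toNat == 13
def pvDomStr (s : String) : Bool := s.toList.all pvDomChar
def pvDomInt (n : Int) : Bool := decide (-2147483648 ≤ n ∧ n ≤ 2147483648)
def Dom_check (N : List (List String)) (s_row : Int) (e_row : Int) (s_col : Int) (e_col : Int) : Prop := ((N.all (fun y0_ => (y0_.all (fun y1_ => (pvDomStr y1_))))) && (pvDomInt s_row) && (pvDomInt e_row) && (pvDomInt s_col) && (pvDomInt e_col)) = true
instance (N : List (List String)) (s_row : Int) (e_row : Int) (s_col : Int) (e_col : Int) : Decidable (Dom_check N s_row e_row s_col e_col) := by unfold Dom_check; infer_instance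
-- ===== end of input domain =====

-- B replaces A's counter-and-reset scan by a brute-force search over all constant windows of
-- each line; equivalence is proved on the inputs where A raises no IndexError (Pre_check).

-- ===== PORT A =====
def check (N : List (List String)) (s_row : Int) (e_row : Int) (s_col : Int) (e_col : Int) : Int :=
  let n : Nat := N.length
  let result : Int := 1
  let result := (PySem.List.pyRange s_row (e_row + 1) 1).foldl (fun result i =>
    ((PySem.List.pyRange 1 (n : Int) 1).foldl (fun (st : Int × Int) j =>
      let cnt := if PySem.List.pyGetD (PySem.List.pyGetD N i []) (j - 1) "" ==
                    PySem.List.pyGetD (PySem.List.pyGetD N i []) j "" then st.1 + 1 else 1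
      let result := if cnt > st.2 then cnt else st.2
      (cnt, result)) (1, result)).2) result
  (PySem.List.pyRange s_col (e_col + 1) 1).foldl (fun result i =>
    ((PySem.List.pyRange 1 (n : Int) 1).foldl (fun (st : Int × Int) j =>
      let cnt := if PySem.List.pyGetD (PySem.List.pyGetD N (j - 1) []) i "" ==
                    PySem.List.pyGetD (PySem.List.pyGetD N j []) i "" then st.1 + 1 else 1
      let result := if cnt > st.2 then cnt else st.2
      (cnt, result)) (1, result)).2) result

-- ===== PORT B =====
-- B's _longest_constant_window: brute force over all [s, e] windows, count test for constancy
def longestB (seq : List String) : Int :=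
  let n : Nat := seq.length
  (PySem.List.pyRange 0 (n : Int) 1).foldl (fun best s =>
    (PySem.List.pyRange s (n : Int) 1).foldl (fun best e =>
      let w := PySem.List.slice seq (some s) (some (e + 1))
      if PySem.List.count w (PySem.List.pyGetD w 0 "") == w.length then
        (if e - s + 1 > best then e - s + 1 else best)
      else best) best) 1

def check_alt (N : List (List String)) (s_row : Int) (e_row : Int) (s_col : Int) (e_col : Int) : Int :=
  let n : Nat := N.length
  if n < 2 then 1 else
  let best : Int := 1
  let best := (PySem.List.pyRange s_row (e_row + 1) 1).foldl (fun best i =>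
    let b := longestB (PySem.List.slice (PySem.List.pyGetD N i []) none (some (n : Int)))
    if b > best then b else best) best
  (PySem.List.pyRange s_col (e_col + 1) 1).foldl (fun best i =>
    let b := longestB ((PySem.List.pyRange 0 (n : Int) 1).map
      (fun j => PySem.List.pyGetD (PySem.List.pyGetD N j []) i ""))
    if b > best then b else best) best

-- ===== PRECONDITION & SPEC =====
-- Pre_check: exactly the inputs on which A raises no IndexError: when n ≥ 2, every visited row
-- index is in Python range and its row has ≥ n entries, and every visited column index is in
-- Python range for every row.
def Pre_check (N : List (List String)) (s_row : Int) (e_row : Int) (s_col : Int) (e_col : Int) : Prop :=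
  (let n : Nat := N.length
   ((decide (n < 2) || decide (e_row < s_row) ||
      (decide (-(n : Int) ≤ s_row) && decide (e_row < (n : Int)) &&
       (PySem.List.pyRange s_row (e_row + 1) 1).all
         (fun i => decide (n ≤ (PySem.List.pyGetD N i []).length)))) &&
    (decide (n < 2) || decide (e_col < s_col) ||
      N.all (fun row => decide (-(row.length : Int) ≤ s_col) && decide (e_col < (row.length : Int))))) = true)
instance (N : List (List String)) (s_row : Int) (e_row : Int) (s_col : Int) (e_col : Int) : Decidable (Pre_check N s_row e_row s_col e_col) := by unfold Pre_check; infer_instance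

def pvWitness_check : List (List String) × Int × Int × Int × Int :=
  ([["a", "b"], ["a", "c"]], 0, 1, 0, 1)

def Spec_check (N : List (List String)) (s_row : Int) (e_row : Int) (s_col : Int) (e_col : Int) (out : Int) : Prop := out = check_alt N s_row e_row s_col e_col
instance (N : List (List String)) (s_row : Int) (e_row : Int) (s_col : Int) (e_col : Int) (out : Int) : Decidable (Spec_check N s_row e_row s_col e_col out) := by unfold Spec_check; infer_instance

-- ===== CLAIM (what is proved, stated in full; the proofs are below) =====
def Claim_equal_check : Prop := ∀ (N : List (List String)) (s_row : Int) (e_row : Int) (s_col : Int) (e_col : Int), Dom_check N s_row e_row s_col e_col → Pre_check N s_row e_row s_col e_col → Spec_check N s_row e_row s_col e_col (check N s_row e_row s_col e_col)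

-- ===== LEMMAS AND PROOFS =====

-- run lengths of the maximal blocks of equal elements (proof-side characterisation of A's scan
-- and of B's longest constant window)
def runsAux (prev : String) (k : Int) : List String → List Int
  | [] => [k]
  | x :: xs => if prev == x then runsAux x (k + 1) xs else k :: runsAux x 1 xs

def runs : List String → List Int
  | [] => []
  | x :: xs => runsAux x 1 xs

-- A's inner loop as a structural scan over the remaining line, carrying (prev, cnt, result)
def scanA (prev : String) (c r : Int) : List String → Int
  | [] => r
  | y :: t =>
    let c' := if prev == y then c + 1 else 1
    scanA y c' (if c' > r then c' else r) t

-- every runsAux list contains a run length ≥ its starting count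
theorem exists_run_ge (ys : List String) : ∀ (prev : String) (c : Int),
    ∃ x ∈ runsAux prev c ys, c ≤ x := by
  induction ys with
  | nil => intro prev c; exact ⟨c, by simp [runsAux]⟩
  | cons y t ih =>
    intro prev c
    by_cases h : prev == y
    · obtain ⟨x, hx, hcx⟩ := ih y (c + 1)
      exact ⟨x, by simp [runsAux, h, hx], by omega⟩
    · exact ⟨c, by simp [runsAux, h], le_refl c⟩

theorem foldl_max_init (l : List Int) : ∀ (r a : Int),
    l.foldl max (max r a) = max a (l.foldl max r) := by
  induction l with
  | nil => intro r a; simp [max_comm]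
  | cons x t ih =>
    intro r a
    simp only [List.foldl_cons]
    rw [max_right_comm r a x, ih]

-- scanA equals folding max over the run lengths
theorem scanA_eq_runs (ys : List String) : ∀ (prev : String) (c r : Int),
    1 ≤ c → c ≤ r → (runsAux prev c ys).foldl max r = scanA prev c r ys := by
  induction ys with
  | nil =>
    intro prev c r _ hcr
    simp [runsAux, scanA, max_eq_left hcr]
  | cons y t ih =>
    intro prev c r hc hcr
    by_cases h : prev == y
    · simp only [runsAux, scanA, h, if_pos]
      have hr' : (if c + 1 > r then c + 1 else r) = max r (c + 1) := by
        split <;> omega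
      rw [hr', ← ih y (c + 1) (max r (c + 1)) (by omega) (le_max_right _ _)]
      obtain ⟨x, hx, hcx⟩ := exists_run_ge t y (c + 1)
      have h1 : c + 1 ≤ (runsAux y (c + 1) t).foldl max r :=
        le_trans hcx ((PySem.List.le_foldl_max (runsAux y (c + 1) t) r).2 x hx)
      rw [foldl_max_init, max_eq_right h1]
    · simp only [runsAux, scanA, h, if_neg, Bool.false_eq_true, not_false_iff, List.foldl_cons]
      have h1 : (if (1 : Int) > r then (1 : Int) else r) = r := by omega
      rw [h1, max_eq_left hcr, ih y 1 r le_rfl (by omega)]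

-- A's index fold over [k, k+m) equals scanA on the segment of the line
theorem scan_index (xs : List String) : ∀ (m k : Nat) (c r : Int), k + m + 1 ≤ xs.length →
    ((List.range' k m).foldl (fun (st : Int × Int) j =>
        let cnt := if xs.getD j "" == xs.getD (j + 1) "" then st.1 + 1 else 1
        (cnt, if cnt > st.2 then cnt else st.2)) (c, r)).2
    = scanA (xs.getD k "") c r ((xs.drop (k + 1)).take m) := by
  intro m
  induction m with
  | zero => intro k c r _; simp [scanA]
  | succ m ih =>
    intro k c r hlen
    rw [List.range'_succ]
    simp only [List.foldl_cons]
    have hk1 : k + 1 < xs.length := by omega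
    have hdrop : xs.drop (k + 1) = xs.getD (k + 1) "" :: xs.drop (k + 2) := by
      rw [List.getD_eq_getElem _ _ hk1, List.drop_eq_getElem_cons hk1]
    rw [hdrop]
    simp only [List.take_succ_cons, scanA]
    exact ih (k + 1) _ _ (by omega)

-- a fold whose step never decreases the accumulator keeps lower bounds
theorem foldl_mono_ge {α : Type} {g : Int → α → Int} (hg : ∀ r i, r ≤ g r i) :
    ∀ (l : List α) (r : Int), r ≤ l.foldl g r := by
  intro l
  induction l with
  | nil => intro r; simp
  | cons x t ih => intro r; exact le_trans (hg r x) (ih (g r x))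

-- a fold whose step preserves an upper bound stays below it
theorem foldl_le_of_step_le {α : Type} (l : List α) (f : Int → α → Int) (c : Int) :
    ∀ (r : Int), r ≤ c → (∀ b x, x ∈ l → b ≤ c → f b x ≤ c) → l.foldl f r ≤ c := by
  induction l with
  | nil => intro r hr _; exact hr
  | cons y t ih =>
    intro r hr h
    exact ih (f r y) (h r y (by simp) hr) (fun b x hx hb => h b x (by simp [hx]) hb)

-- a never-decreasing fold is ≥ any value forced by one of its steps
theorem foldl_ge_of_mem {α : Type} {f : Int → α → Int} (hf : ∀ b x, b ≤ f b x)
    {l : List α} {x : α} (hx : x ∈ l) {v : Int} (hv : ∀ b, v ≤ f b x) :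
    ∀ (r : Int), v ≤ l.foldl f r := by
  induction l with
  | nil => cases hx
  | cons y t ih =>
    intro r
    rcases List.mem_cons.1 hx with rfl | hxt
    · exact le_trans (hv r) (foldl_mono_ge hf t (f r x))
    · exact ih hxt (f r y)

-- congruence for folds that agree and stay ≥ 1
theorem foldl_congr_ge_one {α : Type} (l : List α) (f g : Int → α → Int) :
    ∀ (r : Int), 1 ≤ r → (∀ r i, i ∈ l → 1 ≤ r → f r i = g r i ∧ 1 ≤ f r i) →
    l.foldl f r = l.foldl g r := by
  induction l with
  | nil => intro r _ _; rfl
  | cons x t ih =>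
    intro r hr h
    simp only [List.foldl_cons]
    obtain ⟨heq, hge⟩ := h r x (by simp) hr
    rw [← heq]
    exact ih (f r x) hge (fun r' i hi hr' => h r' i (by simp [hi]) hr')

-- folding a constant-returning step
theorem foldl_keep (l : List Int) (r : Int) : l.foldl (fun r (_ : Int) => r) r = r := by
  induction l generalizing r with
  | nil => rfl
  | cons x t ih => simp only [List.foldl_cons]; exact ih r

-- ---- B side: the brute-force window fold equals the fold of max over the run lengths ----

-- runsAux in closed form: the first run absorbs the leading equal prefix
theorem runsAux_eq (ys : List String) : ∀ (p : String) (c : Int),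
    runsAux p c ys = (c + ((ys.takeWhile (· == p)).length : Int)) :: runs (ys.dropWhile (· == p)) := by
  induction ys with
  | nil => intro p c; simp [runsAux, runs]
  | cons y t ih =>
    intro p c
    by_cases h : p == y
    · have hy : y = p := (eq_of_beq h).symm
      subst hy
      simp only [runsAux, h, if_pos]
      rw [ih y (c + 1)]
      simp only [List.takeWhile_cons, List.dropWhile_cons, BEq.rfl, if_pos, List.length_cons]
      congr 1
      push_cast; ring
    · have hy : (y == p) = false := by
        rw [beq_eq_false_iff_ne]
        intro e
        exact h (by rw [e]; exact BEq.rfl)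
      simp only [runsAux, h, if_neg, Bool.false_eq_true, not_false_iff]
      simp [hy, runs]

-- first-run lower bound: an all-equal prefix of length k forces the head run ≥ c + k
theorem runsAux_head_ge (ys : List String) : ∀ (p : String) (c : Int) (k : Nat),
    (∀ b ∈ ys.take k, b = p) → k ≤ ys.length →
    ∃ h t, runsAux p c ys = h :: t ∧ c + (k : Int) ≤ h := by
  induction ys with
  | nil =>
    intro p c k _ hk
    simp at hk
    exact ⟨c, [], by simp [runsAux], by simp [hk]⟩
  | cons y t ih =>
    intro p c k hall hk
    cases k with
    | zero =>
      by_cases h : p == y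
      · obtain ⟨h', t', he, hge⟩ := ih y (c + 1) 0 (by simp) (by omega)
        exact ⟨h', t', by simp [runsAux, h, he], by omega⟩
      · exact ⟨c, runsAux y 1 t, by simp [runsAux, h], by simp⟩
    | succ m =>
      have hy : y = p := hall y (by simp)
      subst hy
      have h : y == y := BEq.rfl
      obtain ⟨h', t', he, hge⟩ := ih y (c + 1) m
        (fun b hb => hall b (by simp [List.take_succ_cons, hb])) (by simpa using hk)
      exact ⟨h', t', by simp [runsAux, he], by push_cast at hge ⊢; omega⟩

-- bumping the starting count shifts only the head run
theorem runsAux_succ (ys : List String) : ∀ (p : String) (c : Int),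
    ∃ h t, runsAux p c ys = h :: t ∧ runsAux p (c + 1) ys = (h + 1) :: t := by
  induction ys with
  | nil => intro p c; exact ⟨c, [], rfl, rfl⟩
  | cons y t ih =>
    intro p c
    by_cases h : p == y
    · obtain ⟨h', t', h1, h2⟩ := ih y (c + 1)
      exact ⟨h', t', by simp [runsAux, h, h1], by simp [runsAux, h, h2]⟩
    · exact ⟨c, runsAux y 1 t, by simp [runsAux, h], by simp [runsAux, h]⟩

-- every run of the tail is dominated by a run of the whole list
theorem runs_cons_dominates (x : String) (xs : List String) :
    ∀ ρ ∈ runs xs, ∃ ρ' ∈ runs (x :: xs), ρ ≤ ρ' := by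
  intro ρ hρ
  cases xs with
  | nil => simp [runs] at hρ
  | cons y t =>
    simp only [runs] at hρ ⊢
    by_cases h : x == y
    · obtain ⟨h', t', h1, h2⟩ := runsAux_succ t y 1
      simp only [runsAux, h, if_pos]
      rw [h1] at hρ
      rw [h2]
      rcases List.mem_cons.1 hρ with rfl | hmem
      · exact ⟨ρ + 1, by simp, by omega⟩
      · exact ⟨ρ, by simp [hmem], le_rfl⟩
    · simp only [runsAux, h, if_neg, Bool.false_eq_true, not_false_iff]
      exact ⟨ρ, by simp [hρ], le_rfl⟩

-- (A-direction) a constant window of length k is bounded by some run length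
theorem win_le_run (seq : List String) : ∀ (s k : Nat) (a : String), 0 < k →
    s + k ≤ seq.length → (∀ b ∈ (seq.drop s).take k, b = a) →
    ∃ ρ ∈ runs seq, (k : Int) ≤ ρ := by
  induction seq with
  | nil => intro s k a hk hlen _; simp at hlen; omega
  | cons x xs ih =>
    intro s k a hk hlen hall
    cases s with
    | zero =>
      have hx : x = a := hall x (by cases k with | zero => omega | succ m => simp)
      subst hx
      obtain ⟨m, rfl⟩ : ∃ m, k = m + 1 := ⟨k - 1, by omega⟩
      have hall' : ∀ b ∈ xs.take m, b = x := by
        intro b hb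
        exact hall b (by simp [List.take_succ_cons, hb])
      obtain ⟨h', t', he, hge⟩ := runsAux_head_ge xs x 1 m hall' (by simp at hlen; omega)
      refine ⟨h', ?_, ?_⟩
      · simp [runs, he]
      · push_cast at hge ⊢; omega
    | succ s' =>
      obtain ⟨ρ, hρ, hkρ⟩ := ih s' k a hk (by simp at hlen; omega) (by simpa using hall)
      obtain ⟨ρ', hρ', hle⟩ := runs_cons_dominates x xs ρ hρ
      exact ⟨ρ', hρ', le_trans hkρ hle⟩

-- (B-direction) every run length is realised by a constant window
theorem runs_achieved_fuel : ∀ (n : Nat) (seq : List String), seq.length ≤ n →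
    ∀ ρ ∈ runs seq, ∃ (s k : Nat) (a : String), 0 < k ∧ s + k ≤ seq.length ∧ (k : Int) = ρ ∧
      ∀ b ∈ (seq.drop s).take k, b = a := by
  intro n
  induction n with
  | zero =>
    intro seq hlen ρ hρ
    have : seq = [] := List.length_eq_zero_iff.1 (by omega)
    subst this; simp [runs] at hρ
  | succ n ih =>
    intro seq hlen ρ hρ
    cases seq with
    | nil => simp [runs] at hρ
    | cons x xs =>
      simp only [runs] at hρ
      rw [runsAux_eq xs x 1] at hρ
      set L : Nat := (xs.takeWhile (· == x)).length with hL
      set rest : List String := xs.dropWhile (· == x) with hrest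
      have hLlen : L ≤ xs.length := by
        rw [hL]; simpa using List.IsPrefix.length_le (List.takeWhile_prefix _)
      have hdropL : xs.drop L = rest := by
        have key := List.drop_left (l₁ := xs.takeWhile (· == x)) (l₂ := xs.dropWhile (· == x))
        rw [List.takeWhile_append_dropWhile] at key
        rw [hL, hrest]; exact key
      have hrestlen : L + rest.length = xs.length := by
        have := congrArg List.length hdropL
        simp [List.length_drop] at this
        omega
      rcases List.mem_cons.1 hρ with rfl | hmem
      · refine ⟨0, L + 1, x, by omega, by simp; omega, by push_cast; ring, ?_⟩
        intro b hb
        simp only [List.drop_zero] at hb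
        have htk : (x :: xs).take (L + 1) = x :: xs.take L := by simp [List.take_succ_cons]
        rw [htk] at hb
        rcases List.mem_cons.1 hb with rfl | hb'
        · rfl
        · have : b ∈ xs.takeWhile (· == x) := by
            rw [hL] at hb'
            rwa [((List.prefix_iff_eq_take).1 (List.takeWhile_prefix _)).symm] at hb'
          exact eq_of_beq (List.mem_takeWhile_imp (p := fun z => z == x) this)
      · obtain ⟨s', k', a, hk', hlen', hval, hall'⟩ := ih rest
          (by simp only [List.length_cons] at hlen; omega) ρ hmem
        refine ⟨1 + L + s', k', a, hk', by simp; omega, hval, ?_⟩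
        intro b hb
        apply hall' b
        have : (x :: xs).drop (1 + L + s') = rest.drop s' := by
          have h1 : (x :: xs).drop (1 + L + s') = xs.drop (L + s') := by
            have : 1 + L + s' = (L + s') + 1 := by omega
            rw [this]
            simp [List.drop_succ_cons]
          rw [h1, ← hdropL, ← List.drop_drop]
        rwa [this] at hb

-- the constancy test of B's port, spelled out
theorem window_test_iff (w : List String) :
    (PySem.List.count w (PySem.List.pyGetD w 0 "") == w.length) = true ↔
      ∀ b ∈ w, b = PySem.List.pyGetD w 0 "" := by
  rw [beq_iff_eq, PySem.List.count_eq, List.count_eq_length]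
  constructor
  · intro h b hb; exact (h b hb).symm
  · intro h b hb; exact (h b hb).symm

theorem pyGetD_zero_cons (x : String) (t : List String) :
    PySem.List.pyGetD (x :: t) 0 "" = x := by
  simp [PySem.List.pyGetD, PySem.List.pyGet?, PySem.List.pyIdx?]

-- a window slice with positive length inside the list, in drop/take form
theorem slice_window (seq : List String) (s k : Nat) (hk : 0 < k) (hsk : s + k ≤ seq.length) :
    PySem.List.slice seq (some (s : Int)) (some ((s : Int) + (k : Int))) = (seq.drop s).take k ∧
    ((seq.drop s).take k) ≠ [] := by
  refine ⟨PySem.List.slice_natCast_add seq s k, ?_⟩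
  have : ((seq.drop s).take k).length = k := by
    rw [List.length_take, List.length_drop]
    omega
  intro h
  rw [h] at this
  simp at this
  omega

-- central lemma: B's brute-force window search equals the fold of max over the run lengths
theorem longestB_eq_runs (seq : List String) :
    longestB seq = (runs seq).foldl max 1 := by
  simp only [longestB]
  set n : Nat := seq.length with hn
  set R : Int := (runs seq).foldl max 1 with hR
  set inner : Int → Int → Int → Int := fun s best e =>
    let w := PySem.List.slice seq (some s) (some (e + 1))
    if PySem.List.count w (PySem.List.pyGetD w 0 "") == w.length then
      (if e - s + 1 > best then e - s + 1 else best)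
    else best with hinner
  set outer : Int → Int → Int := fun best s =>
    (PySem.List.pyRange s (n : Int) 1).foldl (inner s) best with houter
  have hinner_mono : ∀ (s : Int) (b e : Int), b ≤ inner s b e := by
    intro s b e
    rw [hinner]
    simp only
    split <;> [split <;> omega; omega]
  have houter_mono : ∀ (b s : Int), b ≤ outer b s := by
    intro b s
    exact foldl_mono_ge (hinner_mono s) _ b
  show (PySem.List.pyRange 0 (n : Int) 1).foldl outer 1 = R
  apply le_antisymm
  · -- every fired window is a constant window, bounded by a run, bounded by R
    apply foldl_le_of_step_le _ outer R 1 (PySem.List.le_foldl_max (runs seq) 1).1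
    intro b s hs hb
    rw [houter]
    apply foldl_le_of_step_le _ (inner s) R b hb
    intro b' e he hb'
    obtain ⟨hs0, hsn⟩ := (PySem.List.mem_pyRange_one).1 hs
    obtain ⟨hse, hen⟩ := (PySem.List.mem_pyRange_one).1 he
    rw [hinner]
    simp only
    split
    · rename_i htest
      set w := PySem.List.slice seq (some s) (some (e + 1)) with hw
      set s0 : Nat := s.toNat with hs0'
      set k : Nat := e.toNat - s0 + 1 with hk'
      have hcast : s = (s0 : Int) ∧ e + 1 = (s0 : Int) + (k : Int) := by
        constructor <;> omega
      have hskn : s0 + k ≤ n := by omega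
      obtain ⟨hweq, hwne⟩ := slice_window seq s0 k (by omega) hskn
      have hw' : w = (seq.drop s0).take k := by
        rw [hw, hcast.1, hcast.2, hweq]
      have hall : ∀ b ∈ w, b = PySem.List.pyGetD w 0 "" :=
        (window_test_iff w).1 htest
      obtain ⟨ρ, hρ, hkρ⟩ := win_le_run seq s0 k (PySem.List.pyGetD w 0 "")
        (by omega) hskn (by rw [← hw']; exact hall)
      have hρR : ρ ≤ R := (PySem.List.le_foldl_max (runs seq) 1).2 ρ hρ
      have : e - s + 1 = (k : Int) := by omega
      split <;> omega
    · exact hb'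
  · -- every run length is realised by a constant window the fold visits
    have hF1 : (1 : Int) ≤ (PySem.List.pyRange 0 (n : Int) 1).foldl outer 1 :=
      foldl_mono_ge houter_mono _ 1
    apply foldl_le_of_step_le _ max _ 1 hF1
    intro b ρ hρ hb
    obtain ⟨s, k, a, hk, hskn, hkρ, hall⟩ :=
      runs_achieved_fuel n seq le_rfl ρ hρ
    have hsin : ((s : Nat) : Int) ∈ PySem.List.pyRange 0 (n : Int) 1 := by
      rw [PySem.List.mem_pyRange_one]
      constructor <;> omega
    have hρF : ρ ≤ (PySem.List.pyRange 0 (n : Int) 1).foldl outer 1 := by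
      apply foldl_ge_of_mem houter_mono hsin _ 1
      intro b'
      rw [houter]
      have hein : (((s + k - 1 : Nat)) : Int) ∈ PySem.List.pyRange ((s : Nat) : Int) (n : Int) 1 := by
        rw [PySem.List.mem_pyRange_one]
        constructor <;> omega
      apply foldl_ge_of_mem (hinner_mono _) hein _ b'
      intro b''
      rw [hinner]
      simp only
      obtain ⟨hweq, hwne⟩ := slice_window seq s k hk hskn
      have hcast : (((s + k - 1 : Nat)) : Int) + 1 = (s : Int) + (k : Int) := by
        omega
      rw [hcast, hweq]
      set w : List String := (seq.drop s).take k
      have hall' : ∀ b ∈ w, b = PySem.List.pyGetD w 0 "" := by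
        obtain ⟨x, t, hxt⟩ : ∃ x t, w = x :: t := by
          cases hc : w with
          | nil => exact absurd hc hwne
          | cons x t => exact ⟨x, t, rfl⟩
        have hx : PySem.List.pyGetD w 0 "" = x := by rw [hxt]; exact pyGetD_zero_cons x t
        intro b hbw
        rw [hx, hall b hbw, ← hall x (by rw [hxt]; simp)]
      rw [if_pos ((window_test_iff w).2 hall')]
      have : (((s + k - 1 : Nat)) : Int) - ((s : Nat) : Int) + 1 = (k : Int) := by
        omega
      rw [this, ← hkρ]
      split <;> omega
    exact max_le hb hρF

-- per line: folding A's result through B's "if b > best" step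
theorem line_eq (line : List String) (r : Int) (hr : 1 ≤ r) :
    (if longestB line > r then longestB line else r) = (runs line).foldl max r := by
  rw [longestB_eq_runs]
  have h1 : (runs line).foldl max r = (runs line).foldl max (max 1 r) := by
    rw [max_eq_right hr]
  rw [h1, foldl_max_init]
  have := (PySem.List.le_foldl_max (runs line) 1).1
  split <;> omega

-- A's row scan equals the fold of max over the runs of the row slice
theorem rowline_eq (line : List String) (n : Nat) (r : Int)
    (hr : 1 ≤ r) (hn : 2 ≤ n) (hlen : n ≤ line.length) :
    ((PySem.List.pyRange 1 (n : Int) 1).foldl (fun (st : Int × Int) j =>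
        let cnt := if PySem.List.pyGetD line (j - 1) "" == PySem.List.pyGetD line j "" then st.1 + 1 else 1
        (cnt, if cnt > st.2 then cnt else st.2)) (1, r)).2
    = (runs (PySem.List.slice line none (some (n : Int)))).foldl max r := by
  obtain ⟨x, t, rfl⟩ : ∃ x t, line = x :: t := by
    cases line with
    | nil => simp at hlen; omega
    | cons x t => exact ⟨x, t, rfl⟩
  rw [PySem.List.slice_to_natCast]
  rw [PySem.List.pyRange_one 1 (n : Int)]
  have h1 : ((n : Int) - 1).toNat = n - 1 := by omega
  rw [h1, List.foldl_map]
  have hext := List.foldl_ext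
      (fun (st : Int × Int) (k : Nat) =>
        let cnt := if PySem.List.pyGetD (x :: t) (1 + (k : Int) - 1) "" ==
                      PySem.List.pyGetD (x :: t) (1 + (k : Int)) "" then st.1 + 1 else 1
        (cnt, if cnt > st.2 then cnt else st.2))
      (fun (st : Int × Int) (k : Nat) =>
        let cnt := if (x :: t).getD k "" == (x :: t).getD (k + 1) "" then st.1 + 1 else 1
        (cnt, if cnt > st.2 then cnt else st.2))
      ((1 : Int), r) (l := List.range (n - 1)) (by
        intro st k _
        have e1 : (1 : Int) + (k : Int) - 1 = ((k : Nat) : Int) := by omega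
        have e2 : (1 : Int) + (k : Int) = (((k + 1 : Nat)) : Int) := by omega
        simp only [e1]
        simp only [e2]
        simp only [PySem.List.pyGetD_natCast])
  rw [hext]
  rw [List.range_eq_range']
  rw [scan_index (x :: t) (n - 1) 0 1 r (by simp only [List.length_cons] at hlen ⊢; omega)]
  have htake : (x :: t).take n = x :: t.take (n - 1) := by
    obtain ⟨m, rfl⟩ : ∃ m, n = m + 1 := ⟨n - 1, by omega⟩
    simp
  rw [htake]
  simp only [List.getD_cons_zero, List.drop_succ_cons, List.drop_zero, runs]
  exact (scanA_eq_runs _ x 1 r le_rfl hr).symm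

-- A's column scan equals the fold of max over the runs of the built column
theorem colline_eq (N : List (List String)) (i r : Int)
    (hr : 1 ≤ r) (hn : 2 ≤ N.length) :
    ((PySem.List.pyRange 1 (N.length : Int) 1).foldl (fun (st : Int × Int) j =>
        let cnt := if PySem.List.pyGetD (PySem.List.pyGetD N (j - 1) []) i "" ==
                      PySem.List.pyGetD (PySem.List.pyGetD N j []) i "" then st.1 + 1 else 1
        (cnt, if cnt > st.2 then cnt else st.2)) (1, r)).2
    = (runs ((PySem.List.pyRange 0 (N.length : Int) 1).map
        (fun j => PySem.List.pyGetD (PySem.List.pyGetD N j []) i ""))).foldl max r := by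
  set f : Int → String := fun j => PySem.List.pyGetD (PySem.List.pyGetD N j []) i "" with hf
  set col : List String := (PySem.List.pyRange 0 (N.length : Int) 1).map f with hcol
  have hcollen : col.length = N.length := by
    simp [hcol, PySem.List.length_pyRange_one]
  have colget0 : ∀ k : Nat, col.getD k "" = f (k : Int) := by
    intro k
    by_cases hk : k < N.length
    · rw [List.getD_eq_getElem?_getD, hcol,
        PySem.List.getElem?_map_pyRange_zero f N.length k hk, Option.getD_some]
    · rw [List.getD_eq_default _ _ (by omega)]
      have hrow : PySem.List.pyGetD N (k : Int) [] = [] := by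
        rw [PySem.List.pyGetD_natCast]
        exact List.getD_eq_default _ _ (by omega)
      rw [hf]
      simp only [hrow]
      simp [PySem.List.pyGetD, PySem.List.pyGet?, PySem.List.pyIdx?]
  have colget : ∀ k : Nat, col.getD k "" =
      PySem.List.pyGetD (PySem.List.pyGetD N ((k : Nat) : Int) []) i "" := by
    intro k; rw [colget0, hf]
  have hext := List.foldl_ext
      (fun (st : Int × Int) (k : Nat) =>
        let cnt := if PySem.List.pyGetD (PySem.List.pyGetD N (1 + (k : Int) - 1) []) i "" ==
                      PySem.List.pyGetD (PySem.List.pyGetD N (1 + (k : Int)) []) i "" then st.1 + 1 else 1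
        (cnt, if cnt > st.2 then cnt else st.2))
      (fun (st : Int × Int) (k : Nat) =>
        let cnt := if col.getD k "" == col.getD (k + 1) "" then st.1 + 1 else 1
        (cnt, if cnt > st.2 then cnt else st.2))
      ((1 : Int), r) (l := List.range (N.length - 1)) (by
        intro st k _
        have e1 : (1 : Int) + (k : Int) - 1 = ((k : Nat) : Int) := by omega
        have e2 : (1 : Int) + (k : Int) = (((k + 1 : Nat)) : Int) := by omega
        simp only [e1]
        simp only [e2]
        simp only [← colget])
  rw [PySem.List.pyRange_one 1 (N.length : Int)]
  have h1 : ((N.length : Int) - 1).toNat = N.length - 1 := by omega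
  rw [h1, List.foldl_map, hext, List.range_eq_range']
  rw [scan_index col (N.length - 1) 0 1 r (by omega)]
  obtain ⟨x, t, hxt⟩ : ∃ x t, col = x :: t := by
    cases hc : col with
    | nil => rw [hc] at hcollen; simp at hcollen; omega
    | cons x t => exact ⟨x, t, rfl⟩
  have htail : (col.drop 1).take (N.length - 1) = col.drop 1 := by
    apply List.take_of_length_le
    simp [hcollen]
  rw [htail, hxt]
  simp only [List.getD_cons_zero, List.drop_succ_cons, List.drop_zero, runs]
  exact (scanA_eq_runs _ x 1 r le_rfl hr).symm

-- ===== VERDICT =====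
theorem check_spec : Claim_equal_check := by
  intro N s_row e_row s_col e_col _ hpre
  simp only [Spec_check, check, check_alt]
  by_cases hn : N.length < 2
  · have hnil : PySem.List.pyRange 1 (N.length : Int) 1 = [] :=
      PySem.List.pyRange_one_eq_nil (by omega)
    simp only [hn, if_pos, hnil, List.foldl_nil]
    rw [foldl_keep, foldl_keep]
  · rw [Nat.not_lt] at hn
    rw [if_neg (by omega)]
    unfold Pre_check at hpre
    simp only [Bool.and_eq_true, Bool.or_eq_true, decide_eq_true_eq, List.all_eq_true] at hpre
    obtain ⟨hrowsPre, -⟩ := hpre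
    set rA : Int → Int → Int := fun result i =>
      ((PySem.List.pyRange 1 (N.length : Int) 1).foldl (fun (st : Int × Int) j =>
        let cnt := if PySem.List.pyGetD (PySem.List.pyGetD N i []) (j - 1) "" ==
                      PySem.List.pyGetD (PySem.List.pyGetD N i []) j "" then st.1 + 1 else 1
        let result := if cnt > st.2 then cnt else st.2
        (cnt, result)) (1, result)).2 with hrA
    set cA : Int → Int → Int := fun result i =>
      ((PySem.List.pyRange 1 (N.length : Int) 1).foldl (fun (st : Int × Int) j =>
        let cnt := if PySem.List.pyGetD (PySem.List.pyGetD N (j - 1) []) i "" ==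
                      PySem.List.pyGetD (PySem.List.pyGetD N j []) i "" then st.1 + 1 else 1
        let result := if cnt > st.2 then cnt else st.2
        (cnt, result)) (1, result)).2 with hcA
    set rB : Int → Int → Int := fun best i =>
      let b := longestB (PySem.List.slice (PySem.List.pyGetD N i []) none (some (N.length : Int)))
      if b > best then b else best with hrB
    set cB : Int → Int → Int := fun best i =>
      let b := longestB ((PySem.List.pyRange 0 (N.length : Int) 1).map
        (fun j => PySem.List.pyGetD (PySem.List.pyGetD N j []) i ""))
      if b > best then b else best with hcB
    have hrBge : ∀ (r i : Int), r ≤ rB r i := by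
      intro r i; rw [hrB]; simp only; split <;> omega
    have hcBge : ∀ (r i : Int), r ≤ cB r i := by
      intro r i; rw [hcB]; simp only; split <;> omega
    have hrow : (PySem.List.pyRange s_row (e_row + 1) 1).foldl rA 1 =
        (PySem.List.pyRange s_row (e_row + 1) 1).foldl rB 1 := by
      rcases hrowsPre with (h2 | hlt) | h3
      · omega
      · rw [PySem.List.pyRange_one_eq_nil (by omega)]; rfl
      · have hall := h3.2
        refine foldl_congr_ge_one _ rA rB 1 le_rfl ?_
        intro r i hi hr1
        have heq : rA r i = rB r i := by
          rw [hrA, hrB]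
          simp only
          rw [rowline_eq (PySem.List.pyGetD N i []) N.length r hr1 hn (hall i hi),
            line_eq _ r hr1]
        refine ⟨heq, ?_⟩
        rw [heq]
        exact le_trans hr1 (hrBge r i)
    rw [hrow]
    refine foldl_congr_ge_one _ cA cB _ (foldl_mono_ge hrBge _ 1) ?_
    intro r i _ hr1
    have heq : cA r i = cB r i := by
      rw [hcA, hcB]
      simp only
      rw [colline_eq N i r hr1 hn, line_eq _ r hr1]
    refine ⟨heq, ?_⟩
    rw [heq]
    exact le_trans hr1 (hcBge r i)
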